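-- pv_equiv track=rewrite | github.com/drlssl/NewGui | someTest/stopRepeat.py | stopRepeat
-- ===== SOURCE A (Python) =====
-- def stopRepeat(raw_array):
--     index = 0
--     index_list = [0]
--     for i in range(len(raw_array)):
--         comparision = raw_array[index]
--         if raw_array[i] == comparision:
--             i += 1
--         else:
--             index = i
--             index_list.append(index)
--             i += 1
--     return index_list
-- ===== SOURCE B (Python) =====
-- def stopRepeat(raw_array):
--     # Phase 1: group the list into maximal runs of equal values, recording run lengths.
--     lengths = []
--     n = len(raw_array)
--     i = 0
--     while i < n:
--         j = i + 1
--         while j < n and raw_array[j] == raw_array[i]: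
--             j += 1
--         lengths.append(j - i)
--         i = j
--     # Phase 2: prefix-sum the run lengths (all but the last) to get run start offsets.
--     out = [0]
--     pos = 0
--     for L in lengths[:-1]:
--         pos += L
--         out.append(pos)
--     return out
-- ===== Notes on version B (the rewrite author's own statement) =====
-- stated objective: alternative
-- what changed: B replaces A's stateful per-element comparison against a tracked run-start index by a two-phase shape: first group the list into maximal runs of equal values (collecting run lengths), then prefix-sum all but the last run length to produce the run start offsets.
import Mathlib
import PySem

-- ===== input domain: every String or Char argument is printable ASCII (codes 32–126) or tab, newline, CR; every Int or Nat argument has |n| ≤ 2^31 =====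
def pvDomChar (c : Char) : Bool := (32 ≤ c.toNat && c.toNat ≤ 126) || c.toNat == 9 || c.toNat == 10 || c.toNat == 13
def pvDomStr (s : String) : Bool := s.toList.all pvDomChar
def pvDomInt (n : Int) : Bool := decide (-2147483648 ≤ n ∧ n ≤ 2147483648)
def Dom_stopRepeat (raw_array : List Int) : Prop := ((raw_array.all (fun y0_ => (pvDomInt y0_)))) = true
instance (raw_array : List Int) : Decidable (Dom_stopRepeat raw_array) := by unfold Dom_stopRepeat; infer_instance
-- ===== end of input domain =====

-- B groups the list into maximal runs of equal values and prefix-sums the run lengths,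
-- instead of A's per-element comparison against a tracked run-start index; same cost.

-- ===== PORT A =====
-- for i in range(len(raw_array)): state = (index, index_list);
-- raw_array[index] / raw_array[i] are always in range, so List.getD is exact here.
def stopRepeat (raw_array : List Int) : List Int :=
  ((List.range raw_array.length).foldl
    (fun (s : Nat × List Int) i =>
      let comparision := raw_array.getD s.1 0
      if raw_array.getD i 0 = comparision then s
      else (i, s.2 ++ [(i : Int)]))
    (0, [0])).2

-- ===== PORT B =====
-- inner 'while j < n and raw_array[j] == raw_array[i]' = takeWhile/dropWhile on the rest
def runLengths : List Int → List Nat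
  | [] => []
  | x :: xs =>
    ((xs.takeWhile (· == x)).length + 1) :: runLengths (xs.dropWhile (· == x))
termination_by l => l.length
decreasing_by
  have := List.length_dropWhile_le (p := (· == x)) (l := xs)
  simp only [List.length_cons]
  omega

def stopRepeat_alt (raw_array : List Int) : List Int :=
  let lengths := runLengths raw_array
  ((lengths.dropLast).foldl
    (fun (s : Int × List Int) (L : Nat) => (s.1 + (L : Int), s.2 ++ [s.1 + (L : Int)]))
    (0, [0])).2

-- ===== PRECONDITION & SPEC =====
def Spec_stopRepeat (raw_array : List Int) (out : List Int) : Prop := out = stopRepeat_alt raw_array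
instance (raw_array : List Int) (out : List Int) : Decidable (Spec_stopRepeat raw_array out) := by unfold Spec_stopRepeat; infer_instance

-- ===== CLAIM (what is proved, stated in full; the proofs are below) =====
def Claim_equal_stopRepeat : Prop := ∀ (raw_array : List Int), Dom_stopRepeat raw_array → Spec_stopRepeat raw_array (stopRepeat raw_array)

-- ===== LEMMAS AND PROOFS =====

-- common mid-level characterisation: boundary indices k of positions whose value differs
-- from the previous one (p = value of the current run)
def bndv (p : Int) (k : Int) : List Int → List Int
  | [] => []
  | x :: xs => if x = p then bndv p (k + 1) xs else k :: bndv x (k + 1) xs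

lemma getD_of_drop (a : List Int) (k : Nat) (x : Int) (xs : List Int)
    (h : a.drop k = x :: xs) : a.getD k 0 = x := by
  have h1 : (a.drop k).head? = a[k]? := List.head?_drop
  rw [h, List.head?_cons] at h1
  simp [List.getD_eq_getElem?_getD, ← h1]

lemma drop_succ_of_drop (a : List Int) (k : Nat) (x : Int) (xs : List Int)
    (h : a.drop k = x :: xs) : a.drop (k + 1) = xs := by
  have : a.drop (k + 1) = (a.drop k).drop 1 := by
    rw [List.drop_drop]
  simp [this, h]

lemma A_loop (a : List Int) :
    ∀ (xs : List Int) (k idx : Nat) (acc : List Int),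
      a.drop k = xs →
      ((List.range' k (a.length - k)).foldl
        (fun (s : Nat × List Int) i =>
          let comparision := a.getD s.1 0
          if a.getD i 0 = comparision then s
          else (i, s.2 ++ [(i : Int)]))
        (idx, acc)).2
        = acc ++ bndv (a.getD idx 0) (k : Int) xs := by
  intro xs
  induction xs with
  | nil =>
    intro k idx acc h
    have hk : a.length ≤ k := by
      have := congrArg List.length h
      simp at this
      omega
    have : a.length - k = 0 := by omega
    simp [this, bndv]
  | cons x xs ih =>
    intro k idx acc h
    have hk : k < a.length := by
      have := congrArg List.length h
      simp at this
      omega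
    have hx : a.getD k 0 = x := getD_of_drop a k x xs h
    have hd : a.drop (k + 1) = xs := drop_succ_of_drop a k x xs h
    have hm : a.length - k = (a.length - (k + 1)) + 1 := by omega
    rw [hm, List.range'_succ, List.foldl_cons]
    by_cases hc : x = a.getD idx 0
    · have hcond : a.getD k 0 = a.getD idx 0 := by rw [hx, hc]
      have hstep : (let comparision := a.getD (idx, acc).1 0
          if a.getD k 0 = comparision then ((idx, acc) : Nat × List Int)
          else (k, (idx, acc).2 ++ [(k : Int)])) = (idx, acc) := if_pos hcond
      rw [hstep, ih (k + 1) idx acc hd]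
      simp only [bndv, if_pos hc]
      norm_cast
    · have hcond : ¬ (a.getD k 0 = a.getD idx 0) := by rw [hx]; exact hc
      have hstep : (let comparision := a.getD (idx, acc).1 0
          if a.getD k 0 = comparision then ((idx, acc) : Nat × List Int)
          else (k, (idx, acc).2 ++ [(k : Int)])) = (k, acc ++ [(k : Int)]) := if_neg hcond
      rw [hstep, ih (k + 1) k (acc ++ [(k : Int)]) hd, hx]
      simp only [bndv, if_neg hc, List.append_assoc, List.cons_append, List.nil_append]
      norm_cast

lemma A_char (a : List Int) :
    stopRepeat a = 0 :: (match a with | [] => [] | x :: xs => bndv x 1 xs) := by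
  unfold stopRepeat
  rw [List.range_eq_range']
  have h0 : a.length = a.length - 0 := by omega
  rw [h0, A_loop a a 0 0 [0] (by simp)]
  cases a with
  | nil => simp [bndv]
  | cons x xs =>
    simp only [List.getD_cons_zero, bndv]
    norm_num

lemma bndv_all_eq (x : Int) : ∀ (xs : List Int) (k : Int),
    (∀ y ∈ xs, y = x) → bndv x k xs = [] := by
  intro xs
  induction xs with
  | nil => intro k _; simp [bndv]
  | cons y ys ih =>
    intro k h
    have hy : y = x := h y (by simp)
    simp [bndv, hy]
    exact ih (k + 1) (fun z hz => h z (by simp [hz]))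

lemma bndv_split (x y : Int) (r : List Int) : ∀ (t : List Int) (k : Int),
    (∀ z ∈ t, z = x) → y ≠ x →
    bndv x k (t ++ y :: r) = (k + t.length) :: bndv y (k + t.length + 1) r := by
  intro t
  induction t with
  | nil =>
    intro k _ hy
    simp [bndv, hy]
  | cons z t ih =>
    intro k h hy
    have hz : z = x := h z (by simp)
    simp only [List.cons_append, bndv, hz]
    rw [ih (k + 1) (fun w hw => h w (by simp [hw])) hy]
    simp only [List.length_cons]
    push_cast
    ring_nf

lemma runLengths_ne_nil (x : Int) (xs : List Int) : runLengths (x :: xs) ≠ [] := by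
  rw [runLengths]
  simp

lemma B_loop : ∀ (n : Nat) (x : Int) (xs : List Int) (pos : Int) (acc : List Int),
    xs.length ≤ n →
    ((runLengths (x :: xs)).dropLast.foldl
      (fun (s : Int × List Int) (L : Nat) => (s.1 + (L : Int), s.2 ++ [s.1 + (L : Int)]))
      (pos, acc)).2
      = acc ++ bndv x (pos + 1) xs := by
  intro n
  induction n with
  | zero =>
    intro x xs pos acc h
    have : xs = [] := List.length_eq_zero_iff.mp (by omega)
    subst this
    simp [runLengths, bndv]
  | succ n ih =>
    intro x xs pos acc h
    rw [runLengths]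
    set t := xs.takeWhile (· == x) with ht
    set r := xs.dropWhile (· == x) with hr
    have hsplit : t ++ r = xs := List.takeWhile_append_dropWhile
    have htall : ∀ z ∈ t, z = x := by
      intro z hz
      have := List.mem_takeWhile_imp (ht ▸ hz)
      simpa using this
    cases hrc : r with
    | nil =>
      -- single run: lengths = [t.length+1], dropLast = [], all of xs equals x
      have hxs : xs = t := by rw [← hsplit, hrc, List.append_nil]
      simp only [runLengths, List.dropLast_singleton, List.foldl_nil]
      rw [bndv_all_eq x xs (pos + 1) (by intro z hz; exact htall z (hxs ▸ hz))]
      simp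
    | cons y r' =>
      have hy : ¬ (y == x) := by
        have := List.head?_dropWhile_not (p := (· == x)) (l := xs)
        rw [← hr, hrc] at this
        simpa using this
      have hy' : y ≠ x := by simpa using hy
      have hlen : r'.length ≤ n := by
        have h1 : r.length ≤ xs.length := hr ▸ List.length_dropWhile_le _ _
        rw [hrc] at h1
        simp at h1
        omega
      obtain ⟨c, L', hrl⟩ : ∃ c L', runLengths (y :: r') = c :: L' := by
        cases hq : runLengths (y :: r') with
        | nil => exact absurd hq (runLengths_ne_nil y r')
        | cons c L' => exact ⟨c, L', rfl⟩
      rw [hrl, List.dropLast_cons₂, List.foldl_cons, ← hrl]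
      rw [ih y r' (pos + ((t.length + 1 : Nat) : Int)) (acc ++ [pos + ((t.length + 1 : Nat) : Int)]) hlen]
      rw [← hsplit, hrc, bndv_split x y r' t (pos + 1) htall hy']
      push_cast
      simp only [List.append_assoc, List.cons_append, List.nil_append]
      congr 2
      · ring
      · congr 1
        ring
  
lemma B_char (a : List Int) :
    stopRepeat_alt a = 0 :: (match a with | [] => [] | x :: xs => bndv x 1 xs) := by
  unfold stopRepeat_alt
  cases a with
  | nil => simp [runLengths]
  | cons x xs =>
    rw [B_loop xs.length x xs 0 [0] (le_refl _)]
    norm_num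

-- ===== VERDICT (by name: the statement is the Claim_ definition above) =====
theorem stopRepeat_spec : Claim_equal_stopRepeat := by
  intro a _
  unfold Spec_stopRepeat
  rw [A_char, B_char]
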